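-- pv_equiv track=rewrite | github.com/Boostcamp-Recsys9/codingtest-practice | week8/윤성/5-1.py | solution
-- ===== SOURCE A (Python) =====
-- def solution(k, room_number):
--     table = {}
--     answer = []
--     for i in room_number:
--         if table.get(i) == None:
--             table[i] = i+1
--             answer.append(i)
--         else:
--             k = table[i]
--             temp =[k]
--             while True:
--                 if table.get(k) == None:
--                     for l in temp:
--                         table[l] = k+1
--                     table[k] = k+1
--                     answer.append(k)
--                     break
--                 else:
--                     k = table[k]
--                     temp.append(k)
--     return answer
-- ===== SOURCE B (Python) =====
-- def solution(k, room_number):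
--     occupied = set()
--     answer = []
--     for i in room_number:
--         r = i
--         while r in occupied:
--             r += 1
--         occupied.add(r)
--         answer.append(r)
--     return answer
-- ===== Notes on version B (the rewrite author's own statement) =====
-- stated objective: simpler
-- what changed: Replaces the jump-pointer dict with path compression by a plain occupied-set and an upward linear scan for the next free room.
import Mathlib
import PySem

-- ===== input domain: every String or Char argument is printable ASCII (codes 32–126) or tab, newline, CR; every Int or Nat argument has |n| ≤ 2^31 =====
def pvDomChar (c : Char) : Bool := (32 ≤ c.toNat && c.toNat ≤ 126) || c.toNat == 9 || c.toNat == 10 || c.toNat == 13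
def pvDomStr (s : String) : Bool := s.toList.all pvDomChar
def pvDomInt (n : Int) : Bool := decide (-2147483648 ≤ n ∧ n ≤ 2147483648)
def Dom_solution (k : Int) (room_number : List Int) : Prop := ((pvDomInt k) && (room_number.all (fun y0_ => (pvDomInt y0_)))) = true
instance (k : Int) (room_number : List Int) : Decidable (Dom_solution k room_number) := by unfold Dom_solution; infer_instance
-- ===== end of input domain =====

-- B replaces A's jump-pointer dict (with path compression) by an occupied set and a
-- linear upward scan; objective: simpler. Same return value; A's dict is internal state only.

-- ===== PORT A =====
-- the 'while True' chain walk: follow table[k] until k is free, collecting visited rooms in temp.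
-- fuel only makes the recursion total; stepA always supplies fuel > chain length (the chain
-- visits strictly increasing keys of the unchanged table), so the 0-case is never reached there.
def findA (t : PySem.Dict Int Int) (fuel : Nat) (k : Int) (temp : List Int) : Int × List Int :=
  match fuel with
  | 0 => (k, temp)
  | fuel + 1 =>
    match t.get? k with
    | none => (k, temp)
    | some k2 => findA t fuel k2 (temp ++ [k2])

def stepA (st : PySem.Dict Int Int × List Int) (i : Int) : PySem.Dict Int Int × List Int :=
  match st.1.get? i with
  | none => (st.1.insert i (i + 1), st.2 ++ [i])
  | some k0 =>
    let p := findA st.1 (st.1.size + 1) k0 [k0]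
    let t1 := p.2.foldl (fun t l => t.insert l (p.1 + 1)) st.1
    (t1.insert p.1 (p.1 + 1), st.2 ++ [p.1])

def solution (k : Int) (room_number : List Int) : List Int :=
  (room_number.foldl stepA (PySem.Dict.empty, [])).2

-- ===== PORT B =====
-- measure lemma for the two scans/walks: raising the lower bound past a member shrinks the tail
lemma filter_ge_len_lt (xs : List Int) (a b : Int) (hab : a < b) (ha : a ∈ xs) :
    (xs.filter (fun x => decide (b ≤ x))).length < (xs.filter (fun x => decide (a ≤ x))).length := by
  have hsub : xs.filter (fun x => decide (b ≤ x))
      = (xs.filter (fun x => decide (a ≤ x))).filter (fun x => decide (b ≤ x)) := by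
    rw [List.filter_filter]
    apply List.filter_congr
    intro x _
    by_cases hx : b ≤ x
    · have hax : a ≤ x := by omega
      simp [hx, hax]
    · simp [hx]
  rw [hsub]
  apply List.length_filter_lt_length_iff_exists.mpr
  refine ⟨a, by simp [ha], by simp; omega⟩

-- 'while r in occupied: r += 1' ; terminates because the rooms ≥ r in the finite set shrink.
def nextFree (occ : PySem.Set Int) (r : Int) : Int :=
  if h : PySem.Set.contains occ r then nextFree occ (r + 1) else r
termination_by (occ.filter (fun x => decide (r ≤ x))).length
decreasing_by
  have hr : r ∈ occ := by simpa using h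
  exact filter_ge_len_lt occ r (r + 1) (by omega) hr

def stepB (st : PySem.Set Int × List Int) (i : Int) : PySem.Set Int × List Int :=
  let r := nextFree st.1 i
  (PySem.Set.add st.1 r, st.2 ++ [r])

def solution_alt (k : Int) (room_number : List Int) : List Int :=
  (room_number.foldl stepB (PySem.Set.empty, [])).2

-- ===== PRECONDITION & SPEC =====
def Spec_solution (k : Int) (room_number : List Int) (out : List Int) : Prop := out = solution_alt k room_number
instance (k : Int) (room_number : List Int) (out : List Int) : Decidable (Spec_solution k room_number out) := by unfold Spec_solution; infer_instance

-- ===== CLAIM (what is proved, stated in full; the proofs are below) =====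
def Claim_equal_solution : Prop := ∀ (k : Int) (room_number : List Int), Dom_solution k room_number → Spec_solution k room_number (solution k room_number)

-- ===== LEMMAS AND PROOFS =====

-- state invariant tying A's table to B's occupied set:
-- keys = occupied rooms, and each stored pointer t[x] = v satisfies x < v with [x, v) all occupied.
def InvAB (t : PySem.Dict Int Int) (occ : PySem.Set Int) : Prop :=
  (∀ x : Int, t.contains x = true ↔ x ∈ occ) ∧
  (∀ x v : Int, t.get? x = some v → x < v ∧ ∀ y : Int, x ≤ y → y < v → t.contains y = true)

lemma nf_unique (occ : PySem.Set Int) (r x : Int) (hge : r ≤ x) (hnm : x ∉ occ)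
    (hcov : ∀ y : Int, r ≤ y → y < x → y ∈ occ) : nextFree occ r = x := by
  rw [nextFree]
  by_cases hr : PySem.Set.contains occ r = true
  · have hrm : r ∈ occ := by simpa using hr
    have hne : r ≠ x := fun e => hnm (e ▸ hrm)
    rw [dif_pos hr]
    exact nf_unique occ (r + 1) x (by omega) hnm (fun y h1 h2 => hcov y (by omega) h2)
  · rw [dif_neg hr]
    by_contra hne
    have hlt : r < x := lt_of_le_of_ne hge hne
    exact hr (by simpa using hcov r le_rfl hlt)
termination_by (x - r).toNat
decreasing_by
  have hrm : r ∈ occ := by simpa using hr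
  have : r ≠ x := fun e => hnm (e ▸ hrm)
  omega

lemma fold_insert_get? (temp : List Int) (t : PySem.Dict Int Int) (v x : Int) :
    ((temp.foldl (fun t l => t.insert l v) t).get? x)
      = if x ∈ temp then some v else t.get? x := by
  induction temp generalizing t with
  | nil => simp
  | cons l rest ih =>
    simp only [List.foldl_cons]
    rw [ih]
    by_cases h1 : x ∈ rest <;> by_cases h2 : x = l <;>
      simp [h1, h2, PySem.Dict.get?_insert]

lemma findA_spec (t : PySem.Dict Int Int)
    (Htab : ∀ x v : Int, t.get? x = some v → x < v ∧ ∀ y : Int, x ≤ y → y < v → t.contains y = true) :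
    ∀ (fuel : Nat) (k : Int) (temp : List Int),
      (t.keys.filter (fun x => decide (k ≤ x))).length < fuel →
      k ≤ (findA t fuel k temp).1 ∧
      t.contains (findA t fuel k temp).1 = false ∧
      (∀ y : Int, k ≤ y → y < (findA t fuel k temp).1 → t.contains y = true) ∧
      (∀ l : Int, l ∈ (findA t fuel k temp).2 → l ∈ temp ∨ (k ≤ l ∧ l ≤ (findA t fuel k temp).1)) := by
  intro fuel
  induction fuel with
  | zero => intro k temp hfuel; omega
  | succ fuel ih =>
    intro k temp hfuel
    cases h : t.get? k with
    | none =>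
      simp only [findA, h]
      have hc : t.contains k = false := by
        rw [PySem.Dict.contains_eq_isSome_get?, h]; rfl
      exact ⟨le_rfl, hc, fun y h1 h2 => absurd h1 (by omega), fun l hl => Or.inl hl⟩
    | some k2 =>
      simp only [findA, h]
      obtain ⟨hklt, hkcov⟩ := Htab k k2 h
      have hkc : t.contains k = true := by
        rw [PySem.Dict.contains_eq_isSome_get?, h]; rfl
      have hkmem : k ∈ t.keys := (PySem.Dict.contains_iff_mem_keys t k).mp hkc
      have hfuel2 : (t.keys.filter (fun x => decide (k2 ≤ x))).length < fuel := by
        have := filter_ge_len_lt t.keys k k2 hklt hkmem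
        omega
      obtain ⟨ihle, ihfree, ihcov, ihtemp⟩ := ih k2 (temp ++ [k2]) hfuel2
      refine ⟨by omega, ihfree, ?_, ?_⟩
      · intro y h1 h2
        by_cases hy : y < k2
        · exact hkcov y h1 hy
        · exact ihcov y (by omega) h2
      · intro l hl
        rcases ihtemp l hl with hmem | ⟨hge, hle⟩
        · rcases List.mem_append.mp hmem with h' | h'
          · exact Or.inl h'
          · have : l = k2 := by simpa using h'
            exact Or.inr ⟨by omega, by omega⟩
        · exact Or.inr ⟨by omega, hle⟩

lemma step_eq (t : PySem.Dict Int Int) (occ : PySem.Set Int) (ans : List Int) (i : Int)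
    (hinv : InvAB t occ) :
    (stepA (t, ans) i).2 = ans ++ [nextFree occ i] ∧
    InvAB (stepA (t, ans) i).1 (PySem.Set.add occ (nextFree occ i)) := by
  obtain ⟨hmem, htab⟩ := hinv
  cases hi : t.get? i with
  | none =>
    have hic : t.contains i = false := (PySem.Dict.get?_eq_none_iff_contains t i).mp hi
    have hio : i ∉ occ := fun h => by simp [(hmem i).mpr h] at hic
    have hnf : nextFree occ i = i := by
      rw [nextFree, dif_neg]
      simpa using hio
    rw [hnf]
    refine ⟨by simp [stepA, hi], ?_, ?_⟩
    · intro x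
      simp only [stepA, hi]
      rw [PySem.Dict.contains_insert, PySem.Set.mem_add occ i x]
      simp only [Bool.or_eq_true, beq_iff_eq]
      rw [hmem x]
      tauto
    · intro x v hx
      simp only [stepA, hi] at hx ⊢
      rw [PySem.Dict.get?_insert] at hx
      by_cases hxi : x = i
      · rw [if_pos hxi] at hx
        injection hx with hv
        refine ⟨by omega, fun y h1 h2 => ?_⟩
        have hy : y = i := by omega
        rw [hy]
        exact PySem.Dict.contains_insert_self t i (i + 1)
      · rw [if_neg hxi] at hx
        obtain ⟨hlt, hcov⟩ := htab x v hx
        refine ⟨hlt, fun y h1 h2 => ?_⟩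
        rw [PySem.Dict.contains_insert]
        simp [hcov y h1 h2]
  | some k0 =>
    obtain ⟨hik, hicov⟩ := htab i k0 hi
    have hfuel : (t.keys.filter (fun x => decide (k0 ≤ x))).length < t.size + 1 := by
      have h1 : (t.keys.filter (fun x => decide (k0 ≤ x))).length ≤ t.keys.length :=
        List.length_filter_le _ _
      have h2 : t.keys.length = t.size := by
        simp [PySem.Dict.keys, PySem.Dict.size]
      omega
    obtain ⟨hkfge, hkffree, hkfcov, htemp⟩ := findA_spec t htab (t.size + 1) k0 [k0] hfuel
    set p := findA t (t.size + 1) k0 [k0] with hp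
    have htemp2 : ∀ l ∈ p.2, k0 ≤ l ∧ l ≤ p.1 := by
      intro l hl
      rcases htemp l hl with hc | hc
      · have he : l = k0 := by simpa using hc
        subst he
        exact ⟨le_rfl, hkfge⟩
      · exact hc
    have hkfocc : p.1 ∉ occ := fun h => by simp [(hmem p.1).mpr h] at hkffree
    have hnf : nextFree occ i = p.1 := by
      apply nf_unique occ i p.1 (by omega) hkfocc
      intro y h1 h2
      by_cases hy : y < k0
      · exact (hmem y).mp (hicov y h1 hy)
      · exact (hmem y).mp (hkfcov y (by omega) h2)
    have hget : ∀ x : Int, (stepA (t, ans) i).1.get? x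
        = if x = p.1 then some (p.1 + 1) else if x ∈ p.2 then some (p.1 + 1) else t.get? x := by
      intro x
      simp only [stepA, hi]
      rw [← hp, PySem.Dict.get?_insert, fold_insert_get?]
    have hcont : ∀ x : Int, (stepA (t, ans) i).1.contains x = true ↔ (x = p.1 ∨ t.contains x = true) := by
      intro x
      rw [PySem.Dict.contains_eq_isSome_get?, hget x]
      by_cases h1 : x = p.1
      · simp [h1]
      · rw [if_neg h1]
        by_cases h2 : x ∈ p.2
        · rw [if_pos h2]
          obtain ⟨hge2, hle2⟩ := htemp2 x h2
          have hlt : x < p.1 := lt_of_le_of_ne hle2 h1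
          simp [h1, hkfcov x hge2 hlt]
        · rw [if_neg h2, ← PySem.Dict.contains_eq_isSome_get?]
          simp [h1]
    rw [hnf]
    refine ⟨?_, ?_, ?_⟩
    · simp only [stepA, hi]
      rw [← hp]
    · intro x
      rw [hcont x, PySem.Set.mem_add occ p.1 x, hmem x]
      tauto
    · intro x v hx
      rw [hget x] at hx
      by_cases h1 : x = p.1
      · rw [if_pos h1] at hx
        injection hx with hv
        subst h1
        refine ⟨by omega, fun y hy1 hy2 => ?_⟩
        have hy : y = p.1 := by omega
        subst hy
        exact (hcont (p.1)).mpr (Or.inl rfl)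
      · rw [if_neg h1] at hx
        by_cases h2 : x ∈ p.2
        · rw [if_pos h2] at hx
          injection hx with hv
          obtain ⟨hge2, hle2⟩ := htemp2 x h2
          refine ⟨by omega, fun y hy1 hy2 => ?_⟩
          rw [hcont y]
          by_cases hy : y = p.1
          · exact Or.inl hy
          · right
            exact hkfcov y (by omega) (by omega)
        · rw [if_neg h2] at hx
          obtain ⟨hlt, hcov⟩ := htab x v hx
          exact ⟨hlt, fun y hy1 hy2 => (hcont y).mpr (Or.inr (hcov y hy1 hy2))⟩

lemma loop_eq : ∀ (rn : List Int) (t : PySem.Dict Int Int) (occ : PySem.Set Int) (ans : List Int),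
    InvAB t occ → (rn.foldl stepA (t, ans)).2 = (rn.foldl stepB (occ, ans)).2 := by
  intro rn
  induction rn with
  | nil => intro t occ ans _; rfl
  | cons i rest ih =>
    intro t occ ans hinv
    obtain ⟨h2, hinv2⟩ := step_eq t occ ans i hinv
    simp only [List.foldl_cons]
    have hA : stepA (t, ans) i = ((stepA (t, ans) i).1, ans ++ [nextFree occ i]) :=
      Prod.ext rfl h2
    have hB : stepB (occ, ans) i = (PySem.Set.add occ (nextFree occ i), ans ++ [nextFree occ i]) := rfl
    rw [hA, hB]
    exact ih _ _ _ hinv2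

-- ===== VERDICT (by name: the statement is the Claim_ definition above) =====
theorem solution_spec : Claim_equal_solution := by
  intro k rn _
  unfold Spec_solution solution solution_alt
  apply loop_eq
  constructor
  · intro x; simp [PySem.Dict.contains_empty, PySem.Set.empty]
  · intro x v h; simp [PySem.Dict.get?_empty] at h
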